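-- pv_equiv track=rewrite | github.com/adrianbalbs/2025-recruitment-technical-assessment | backend/py_template/devdonalds.py | parse_handwriting
-- ===== SOURCE A (Python) =====
-- from typing import List, Optional
--
-- def parse_handwriting(recipeName: str) -> Optional[str]:
--     def iswhitespace(chr: str) -> bool:
--         return chr.isspace() or chr == "_" or chr == "-"
--
--     tokens = []
--     word_buffer = (
--         recipeName[0].upper() if len(recipeName) > 0 and recipeName[0].isalpha() else ""
--     )
--     str_iter = iter(recipeName[1:])
--
--     while c := next(str_iter, None):
--         if c.isalpha():
--             word_buffer += c.lower()
--         elif iswhitespace(c):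
--             if word_buffer:
--                 tokens.append(word_buffer)
--                 word_buffer = ""
--
--             # skip all whitespace and "_" or "-" characters
--             while (c := next(str_iter, None)) and iswhitespace(c):
--                 pass
--
--             # potentially pointing to the start of a new word
--             if c:
--                 word_buffer += c.upper()
--
--     # there could be a remaining word left in the buffer
--     if word_buffer:
--         tokens.append(word_buffer)
--     new_name = " ".join(tokens)
--     return new_name if len(new_name) > 0 else None
-- ===== SOURCE B (Python) =====
-- from typing import Optional
--
-- def parse_handwriting(recipeName: str) -> Optional[str]:
--     tokens = []
--     buffer = ""
--     capitalize_next = False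
--     for i, c in enumerate(recipeName):
--         if i == 0:
--             if c.isalpha():
--                 buffer = c.upper()
--         elif c.isspace() or c == "_" or c == "-":
--             if buffer:
--                 tokens.append(buffer)
--                 buffer = ""
--             capitalize_next = True
--         elif capitalize_next:
--             buffer += c.upper()
--             capitalize_next = False
--         elif c.isalpha():
--             buffer += c.lower()
--     if buffer:
--         tokens.append(buffer)
--     new_name = " ".join(tokens)
--     return new_name if new_name else None
-- ===== Notes on version B (the rewrite author's own statement) =====
-- stated objective: simpler
-- what changed: Replaced the iterator-based loop with a nested separator-skipping while-loop by a single flat enumerate loop maintaining a capitalize_next flag, so each character is handled exactly once by one four-way branch.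
import Mathlib
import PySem

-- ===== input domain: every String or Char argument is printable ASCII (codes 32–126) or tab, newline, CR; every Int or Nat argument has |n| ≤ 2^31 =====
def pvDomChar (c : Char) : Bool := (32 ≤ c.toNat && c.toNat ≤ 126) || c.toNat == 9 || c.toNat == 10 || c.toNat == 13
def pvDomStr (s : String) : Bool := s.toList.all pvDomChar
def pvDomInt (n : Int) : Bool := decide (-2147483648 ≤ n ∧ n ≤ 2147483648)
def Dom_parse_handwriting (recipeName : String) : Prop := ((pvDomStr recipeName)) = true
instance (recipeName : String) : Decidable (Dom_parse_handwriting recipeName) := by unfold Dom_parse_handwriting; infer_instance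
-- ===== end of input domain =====

-- B replaces A's nested separator-skipping inner loop by one flat enumerate loop with a capitalize_next flag (objective: simpler).

-- ===== PORT A =====
-- iswhitespace(c) of A
def pvSep (c : Char) : Bool := PySem.Chars.isspace c || c == '_' || c == '-'

-- the inner 'while (c := next(str_iter, None)) and iswhitespace(c): pass' loop:
-- returns (remaining iterator contents, the first non-separator char if any)
def pvSkip : List Char → List Char × Option Char
  | [] => ([], none)
  | c :: rest => if pvSep c then pvSkip rest else (rest, some c)

theorem pvSkip_length (l : List Char) : (pvSkip l).1.length ≤ l.length := by
  induction l with
  | nil => simp [pvSkip]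
  | cons c rest ih =>
    simp only [pvSkip]
    split
    · exact le_trans ih (Nat.le_succ _)
    · simp

-- the outer 'while c := next(str_iter, None)' loop of A; state: (tokens, word_buffer)
def pvLoopA : List Char → List (List Char) → List Char → List (List Char)
  | [], toks, buf => if buf.isEmpty then toks else toks ++ [buf]
  | c :: rest, toks, buf =>
    if PySem.Chars.isalpha c then pvLoopA rest toks (buf ++ [PySem.Chars.lowerChar c])
    else if pvSep c then
      let toks' := if buf.isEmpty then toks else toks ++ [buf]
      let p := pvSkip rest
      match p.2 with
      | some d => pvLoopA p.1 toks' [PySem.Chars.upperChar d]   -- buffer was "" after the flush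
      | none => pvLoopA [] toks' []                             -- iterator exhausted: outer loop ends
    else pvLoopA rest toks buf
  termination_by cs _ _ => cs.length
  decreasing_by
  all_goals simp only [List.length_cons, List.length_nil]
  all_goals try exact Nat.lt_succ_of_le (pvSkip_length rest)
  all_goals omega

def parse_handwriting (recipeName : String) : Option String :=
  let cs := recipeName.toList
  let buf0 : List Char := match cs with
    | c :: _ => if PySem.Chars.isalpha c then [PySem.Chars.upperChar c] else []
    | [] => []
  let tokens := pvLoopA (cs.drop 1) [] buf0          -- recipeName[1:]
  let newName := PySem.Chars.join [' '] tokens       -- " ".join(tokens)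
  if newName.length > 0 then some (String.ofList newName) else none

-- ===== PORT B =====
-- one step of B's flat enumerate loop; state: (tokens, buffer, capitalize_next)
def pvStepB (st : List (List Char) × List Char × Bool) (ic : Int × Char) :
    List (List Char) × List Char × Bool :=
  let (toks, buf, cap) := st
  let (i, c) := ic
  if i == 0 then
    if PySem.Chars.isalpha c then (toks, [PySem.Chars.upperChar c], cap) else st
  else if PySem.Chars.isspace c || c == '_' || c == '-' then
    ((if buf.isEmpty then toks else toks ++ [buf]), [], true)
  else if cap then (toks, buf ++ [PySem.Chars.upperChar c], false)
  else if PySem.Chars.isalpha c then (toks, buf ++ [PySem.Chars.lowerChar c], cap)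
  else st

def parse_handwriting_alt (recipeName : String) : Option String :=
  let cs := recipeName.toList
  let st := (PySem.List.enumerate cs 0).foldl pvStepB ([], [], false)
  let tokens := if st.2.1.isEmpty then st.1 else st.1 ++ [st.2.1]
  let newName := PySem.Chars.join [' '] tokens
  if newName.length > 0 then some (String.ofList newName) else none

-- ===== PRECONDITION & SPEC =====
def Spec_parse_handwriting (recipeName : String) (out : Option String) : Prop := out = parse_handwriting_alt recipeName
instance (recipeName : String) (out : Option String) : Decidable (Spec_parse_handwriting recipeName out) := by unfold Spec_parse_handwriting; infer_instance

-- ===== CLAIM (what is proved, stated in full; the proofs are below) =====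
def Claim_equal_parse_handwriting : Prop := ∀ (recipeName : String), Dom_parse_handwriting recipeName → Spec_parse_handwriting recipeName (parse_handwriting recipeName)

-- ===== LEMMAS AND PROOFS =====

-- B's step for indices ≥ 1 (the i == 0 branch never fires)
def pvStepB' (st : List (List Char) × List Char × Bool) (c : Char) :
    List (List Char) × List Char × Bool :=
  let (toks, buf, cap) := st
  if pvSep c then ((if buf.isEmpty then toks else toks ++ [buf]), [], true)
  else if cap then (toks, buf ++ [PySem.Chars.upperChar c], false)
  else if PySem.Chars.isalpha c then (toks, buf ++ [PySem.Chars.lowerChar c], cap)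
  else st

def pvFin (st : List (List Char) × List Char × Bool) : List (List Char) :=
  if st.2.1.isEmpty then st.1 else st.1 ++ [st.2.1]

theorem pvStepB_pos (st : List (List Char) × List Char × Bool) (i : Int) (c : Char)
    (h : i ≠ 0) : pvStepB st (i, c) = pvStepB' st c := by
  obtain ⟨toks, buf, cap⟩ := st
  simp [pvStepB, pvStepB', pvSep, h]

theorem pvFoldB_pos : ∀ (cs : List Char) (s : Int), 1 ≤ s →
    ∀ st, (PySem.List.enumerate cs s).foldl pvStepB st = cs.foldl pvStepB' st
  | [], _, _, _ => rfl
  | c :: rest, s, hs, st => by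
    rw [PySem.List.enumerate_cons, List.foldl_cons, List.foldl_cons,
        pvStepB_pos st s c (by omega), pvFoldB_pos rest (s + 1) (by omega)]

theorem pvSep_of_alpha (c : Char) (h : PySem.Chars.isalpha c = true) : pvSep c = false := by
  have hA : ('A').val.toNat = 65 := rfl
  have hZ : ('Z').val.toNat = 90 := rfl
  have ha : ('a').val.toNat = 97 := rfl
  have hz : ('z').val.toNat = 122 := rfl
  have hu : ('_').val.toNat = 95 := rfl
  have hm : ('-').val.toNat = 45 := rfl
  simp only [PySem.Chars.isalpha, PySem.Chars.isupper, PySem.Chars.islower,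
    Bool.or_eq_true, Bool.and_eq_true, decide_eq_true_eq, Char.le_def,
    UInt32.le_iff_toNat_le] at h
  simp only [pvSep, PySem.Chars.isspace, Bool.or_eq_false_iff, Bool.and_eq_false_iff,
    beq_eq_false_iff_ne, ne_eq, Char.ext_iff, UInt32.ext_iff, decide_eq_false_iff_not,
    Char.toNat, hA, hZ, ha, hz, hu, hm] at *
  omega

-- main invariant: A's loop = B's fold from a cap=false state, and A's sep-skip = B's fold from a cap=true state
theorem pvMain (cs : List Char) :
    (∀ toks buf, pvLoopA cs toks buf = pvFin (cs.foldl pvStepB' (toks, buf, false))) ∧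
    (∀ toks, (match (pvSkip cs).2 with
              | some d => pvLoopA (pvSkip cs).1 toks [PySem.Chars.upperChar d]
              | none => pvLoopA [] toks []) = pvFin (cs.foldl pvStepB' (toks, [], true))) := by
  induction cs with
  | nil =>
    constructor
    · intro toks buf; simp [pvLoopA, pvFin]
    · intro toks; simp [pvSkip, pvLoopA, pvFin]
  | cons c rest ih =>
    obtain ⟨ih1, ih2⟩ := ih
    constructor
    · intro toks buf
      by_cases ha : PySem.Chars.isalpha c = true
      · rw [pvLoopA, if_pos ha, List.foldl_cons]
        have hst : pvStepB' (toks, buf, false) c = (toks, buf ++ [PySem.Chars.lowerChar c], false) := by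
          simp [pvStepB', pvSep_of_alpha c ha, ha]
        rw [hst, ih1]
      · by_cases hs : pvSep c = true
        · rw [pvLoopA, if_neg ha, if_pos hs, List.foldl_cons]
          have hst : pvStepB' (toks, buf, false) c
              = ((if buf.isEmpty then toks else toks ++ [buf]), [], true) := by
            simp [pvStepB', hs]
          rw [hst]
          exact ih2 _
        · rw [pvLoopA, if_neg ha, if_neg hs, List.foldl_cons]
          have hst : pvStepB' (toks, buf, false) c = (toks, buf, false) := by
            simp [pvStepB', hs, ha]
          rw [hst, ih1]
    · intro toks
      by_cases hs : pvSep c = true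
      · have hskip : pvSkip (c :: rest) = pvSkip rest := by simp [pvSkip, hs]
        rw [hskip, List.foldl_cons]
        have hst : pvStepB' (toks, [], true) c = (toks, [], true) := by
          simp [pvStepB', hs]
        rw [hst]
        exact ih2 toks
      · have hskip : pvSkip (c :: rest) = (rest, some c) := by simp [pvSkip, hs]
        rw [hskip, List.foldl_cons]
        have hst : pvStepB' (toks, [], true) c = (toks, [PySem.Chars.upperChar c], false) := by
          simp [pvStepB', hs]
        rw [hst]
        exact ih1 toks [PySem.Chars.upperChar c]

-- ===== VERDICT (by name: the statement is the Claim_ definition above) =====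
theorem parse_handwriting_spec : Claim_equal_parse_handwriting := by
  intro recipeName _
  unfold Spec_parse_handwriting parse_handwriting parse_handwriting_alt
  cases h : recipeName.toList with
  | nil => simp [PySem.List.enumerate, pvLoopA]
  | cons c rest =>
    simp only [List.drop_succ_cons, List.drop_zero]
    rw [PySem.List.enumerate_cons, List.foldl_cons]
    have hstep : pvStepB ([], [], false) (0, c)
        = ([], (if PySem.Chars.isalpha c then [PySem.Chars.upperChar c] else []), false) := by
      by_cases ha : PySem.Chars.isalpha c = true <;> simp [pvStepB, ha]
    rw [hstep, pvFoldB_pos rest (0 + 1) (by omega), (pvMain rest).1]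
    simp [pvFin]
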